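-- pv_equiv track=rewrite | github.com/isk02206/python | informatics/previous/fall1/series_06/DNA_vector.py | replicatie
-- ===== SOURCE A (Python) =====
-- def vector(A):
--     list = [(0,0)]
--     for d in A:
--         for l in list:
--             if d == 'T':
--                 l = (int(l[:][0]) + 1, l[1])
--             elif d == 'A':
--                 l = (int(l[0]) - 1, l[1])
--             elif d == 'G':
--                 l = (l[0], int(l[1]) - 1)
--             elif d == 'C':
--                 l = (l[0], int(l[1]) + 1)
--         list.append(l)
--     return list
--
-- def replicatie(B):
--     b = vector(B)
--     result_1 = ''
--     result_2 = ''
--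
--     result_a = []
--     for x in range(0,len(b)):
--         result_a.append(b[x][1])
--
--     for y in range(len(result_a)):
--         if result_a[y] == max(result_a):
--             result_1 = y
--             break
--
--     result_b = []
--     for z in range(len(b)):
--         result_b.append(b[z][1])
--
--     for w in range(len(result_b)):
--         if result_b[w] == min(result_b):
--             result_2 = w
--             break
--
--     return (result_1, result_2)
-- ===== SOURCE B (Python) =====
-- def replicatie(B):
--     # One pass over B: maintain the cumulative y-coordinate and the first index
--     # at which its running maximum / minimum is attained (only G/C move y).
--     y = 0
--     max_v = min_v = 0
--     max_i = min_i = 0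
--     i = 1
--     for ch in B:
--         if ch == 'C':
--             y += 1
--         elif ch == 'G':
--             y -= 1
--         if y > max_v:
--             max_v, max_i = y, i
--         if y < min_v:
--             min_v, min_i = y, i
--         i += 1
--     return (max_i, min_i)
-- ===== Notes on version B (the rewrite author's own statement) =====
-- stated objective: faster
-- what changed: Replaces the quadratic build (rewriting the whole point list per character, repeatedly appending y-columns and recomputing max/min inside the search loops) by one linear scan that keeps the cumulative y and the first index of its running maximum/minimum.
import Mathlib
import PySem

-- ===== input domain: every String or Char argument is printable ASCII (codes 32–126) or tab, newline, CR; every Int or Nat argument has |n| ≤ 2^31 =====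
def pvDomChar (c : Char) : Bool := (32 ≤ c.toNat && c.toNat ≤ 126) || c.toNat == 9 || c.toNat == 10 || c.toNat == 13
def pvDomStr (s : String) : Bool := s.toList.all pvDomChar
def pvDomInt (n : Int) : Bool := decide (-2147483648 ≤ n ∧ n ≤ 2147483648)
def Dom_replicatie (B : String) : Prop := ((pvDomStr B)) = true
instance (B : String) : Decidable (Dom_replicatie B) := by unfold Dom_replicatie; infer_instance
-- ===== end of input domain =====

-- B replaces A's quadratic rebuild-and-rescan (whole point list rewritten per character, max/min
-- recomputed inside the search loops) by one linear scan tracking the cumulative y-coordinate and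
-- the first index of its running maximum/minimum; objective: faster (asymptotic, O(n^2) -> O(n)).


-- ===== PORT A =====
-- one body of Python's inner `for l in list:` loop
def pvStep (d : Char) (l : Int × Int) : Int × Int :=
  if d == 'T' then (l.1 + 1, l.2)
  else if d == 'A' then (l.1 - 1, l.2)
  else if d == 'G' then (l.1, l.2 - 1)
  else if d == 'C' then (l.1, l.2 + 1)
  else l

-- Python `vector`: the inner loop re-binds l for every element; after it, l holds pvStep d of the
-- LAST element (list is never empty, so the fold's init (0,0) is never the result).
def pvVector (A : List Char) : List (Int × Int) :=
  A.foldl (fun lst d => lst ++ [lst.foldl (fun _l e => pvStep d e) ((0 : Int), (0 : Int))])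
    [((0 : Int), (0 : Int))]

-- Python `for y in range(..): if result_a[y] == max(result_a): result_1 = y; break`.
-- The [] case returns 0, mirroring that result_1 = '' is unreachable (the max is a member).
def pvFindFirstMax (ra : List Int) : List Nat → Int
  | [] => 0
  | y :: rest =>
    if (PySem.List.pyGet? ra (y : Int)).getD 0 == (PySem.List.max? ra (fun v => v)).getD 0
    then (y : Int) else pvFindFirstMax ra rest

def pvFindFirstMin (ra : List Int) : List Nat → Int
  | [] => 0
  | w :: rest =>
    if (PySem.List.pyGet? ra (w : Int)).getD 0 == (PySem.List.min? ra (fun v => v)).getD 0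
    then (w : Int) else pvFindFirstMin ra rest

def replicatie (B : String) : Int × Int :=
  let b := pvVector B.toList
  let result_a := (List.range b.length).foldl
    (fun acc (x : Nat) => acc ++ [((PySem.List.pyGet? b (x : Int)).getD (0, 0)).2]) ([] : List Int)
  let result_1 := pvFindFirstMax result_a (List.range result_a.length)
  let result_b := (List.range b.length).foldl
    (fun acc (z : Nat) => acc ++ [((PySem.List.pyGet? b (z : Int)).getD (0, 0)).2]) ([] : List Int)
  let result_2 := pvFindFirstMin result_b (List.range result_b.length)
  (result_1, result_2)

-- ===== PORT B =====
def replicatie_alt (B : String) : Int × Int :=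
  let s := B.toList.foldl
    (fun (st : Int × Int × Int × Int × Int × Int) ch =>
      match st with
      | (y, maxv, maxi, minv, mini, i) =>
        let y' := if ch == 'C' then y + 1 else if ch == 'G' then y - 1 else y
        let m := if y' > maxv then (y', i) else (maxv, maxi)
        let n := if y' < minv then (y', i) else (minv, mini)
        (y', m.1, m.2, n.1, n.2, i + 1))
    (0, 0, 0, 0, 0, 1)
  (s.2.2.1, s.2.2.2.2.1)

-- ===== PRECONDITION & SPEC =====
def Spec_replicatie (B : String) (out : Int × Int) : Prop := out = replicatie_alt B
instance (B : String) (out : Int × Int) : Decidable (Spec_replicatie B out) := by unfold Spec_replicatie; infer_instance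

-- ===== CLAIM (what is proved, stated in full; the proofs are below) =====
def Claim_equal_replicatie : Prop := ∀ (B : String), Dom_replicatie B → Spec_replicatie B (replicatie B)

-- ===== LEMMAS AND PROOFS =====

-- y-displacement of one character
def pvDy (c : Char) : Int := if c == 'C' then 1 else if c == 'G' then -1 else 0

-- the y-column of A's point list
def pvYm (cs : List Char) : List Int := (pvVector cs).map Prod.snd

-- spec-side: max/min value and first index where it occurs
def pvMx (ra : List Int) : Int := (PySem.List.max? ra (fun v => v)).getD 0
def pvMn (ra : List Int) : Int := (PySem.List.min? ra (fun v => v)).getD 0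
def pvPMax (ra : List Int) (y : Nat) : Bool :=
  (PySem.List.pyGet? ra (y : Int)).getD 0 == pvMx ra
def pvPMin (ra : List Int) (y : Nat) : Bool :=
  (PySem.List.pyGet? ra (y : Int)).getD 0 == pvMn ra
def pvFMax (ra : List Int) : Int := (((List.range ra.length).find? (pvPMax ra)).getD 0 : Nat)
def pvFMin (ra : List Int) : Int := (((List.range ra.length).find? (pvPMin ra)).getD 0 : Nat)

theorem pvStep_snd (d : Char) (p : Int × Int) : (pvStep d p).2 = p.2 + pvDy d := by
  unfold pvStep pvDy
  split_ifs <;> (simp_all; try omega)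

theorem foldl_const_map {α β : Type} (f : α → β) :
    ∀ (l : List α) (a : β), l.foldl (fun _ e => f e) a = (l.map f).getLastD a := by
  intro l
  induction l with
  | nil => intro a; rfl
  | cons x xs ih =>
    intro a
    rw [List.foldl_cons, ih (f x), List.map_cons, List.getLastD_cons]

theorem foldl_snoc_ne_nil {α β : Type} (g : List α → β → α) :
    ∀ (cs : List β) (l : List α), l ≠ [] →
      cs.foldl (fun lst d => lst ++ [g lst d]) l ≠ [] := by
  intro cs
  induction cs with
  | nil => intro l h; exact h
  | cons c cs ih => intro l h; exact ih _ (by simp)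

theorem pvVector_ne_nil (cs : List Char) : pvVector cs ≠ [] := by
  unfold pvVector
  exact foldl_snoc_ne_nil (fun lst d => lst.foldl (fun _l e => pvStep d e) ((0:Int),(0:Int))) cs _ (by simp)

theorem getLastD_map_of_ne_nil {α β : Type} (f : α → β) (v : List α) (hv : v ≠ []) (a : β) (b : α) :
    (v.map f).getLastD a = f (v.getLastD b) := by
  rcases (List.eq_nil_or_concat v) with h | ⟨ys, y, rfl⟩
  · exact absurd h hv
  · simp

theorem pvVector_snoc (cs : List Char) (d : Char) :
    pvVector (cs ++ [d])
      = pvVector cs ++ [((pvVector cs).map (pvStep d)).getLastD ((0 : Int), (0 : Int))] := by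
  unfold pvVector
  rw [List.foldl_append, List.foldl_cons, List.foldl_nil, foldl_const_map]

theorem pvYm_snoc (cs : List Char) (d : Char) :
    pvYm (cs ++ [d]) = pvYm cs ++ [(pvYm cs).getLastD 0 + pvDy d] := by
  have hne := pvVector_ne_nil cs
  unfold pvYm
  rw [pvVector_snoc, List.map_append]
  congr 1
  rw [getLastD_map_of_ne_nil (pvStep d) _ hne _ ((0:Int),(0:Int)),
      getLastD_map_of_ne_nil Prod.snd _ hne _ ((0:Int),(0:Int))]
  simp [pvStep_snd]

theorem pvYm_ne_nil (cs : List Char) : pvYm cs ≠ [] := by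
  unfold pvYm; simp [pvVector_ne_nil cs]

theorem find?_congr_mem {α : Type} (p q : α → Bool) :
    ∀ (l : List α), (∀ x ∈ l, p x = q x) → l.find? p = l.find? q := by
  intro l
  induction l with
  | nil => intro _; rfl
  | cons x xs ih =>
    intro h
    simp only [List.find?]
    rw [h x (by simp)]
    cases q x
    · exact ih (fun y hy => h y (by simp [hy]))
    · rfl

theorem pvIfDy (c : Char) (y : Int) :
    (if c == 'C' then y + 1 else if c == 'G' then y - 1 else y) = y + pvDy c := by
  unfold pvDy
  split_ifs <;> omega

theorem pvMx_concat (ra : List Int) (h : ra ≠ []) (v : Int) :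
    pvMx (ra ++ [v]) = max (pvMx ra) v := by
  rcases ra with _ | ⟨x, t⟩
  · exact absurd rfl h
  · simp [pvMx, List.cons_append, PySem.List.max?_id_cons, List.foldl_append]

theorem pvMn_concat (ra : List Int) (h : ra ≠ []) (v : Int) :
    pvMn (ra ++ [v]) = min (pvMn ra) v := by
  rcases ra with _ | ⟨x, t⟩
  · exact absurd rfl h
  · simp [pvMn, List.cons_append, PySem.List.min?_id_cons, List.foldl_append]

theorem pvMx_le (ra : List Int) (h : ra ≠ []) : ∀ y ∈ ra, y ≤ pvMx ra := by
  rcases ra with _ | ⟨x, t⟩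
  · exact absurd rfl h
  · intro y hy
    have hm := PySem.List.max?_id_cons (x := x) (t := t)
    have := PySem.List.max?_isMax hm y hy
    simpa [pvMx, hm] using this

theorem pvMn_le (ra : List Int) (h : ra ≠ []) : ∀ y ∈ ra, pvMn ra ≤ y := by
  rcases ra with _ | ⟨x, t⟩
  · exact absurd rfl h
  · intro y hy
    have hm := PySem.List.min?_id_cons (x := x) (t := t)
    have := PySem.List.min?_isMin hm y hy
    simpa [pvMn, hm] using this

theorem pvMx_mem (ra : List Int) (h : ra ≠ []) : pvMx ra ∈ ra := by
  rcases ra with _ | ⟨x, t⟩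
  · exact absurd rfl h
  · have hm := PySem.List.max?_id_cons (x := x) (t := t)
    have := PySem.List.max?_mem hm
    simpa [pvMx, hm] using this

theorem pvMn_mem (ra : List Int) (h : ra ≠ []) : pvMn ra ∈ ra := by
  rcases ra with _ | ⟨x, t⟩
  · exact absurd rfl h
  · have hm := PySem.List.min?_id_cons (x := x) (t := t)
    have := PySem.List.min?_mem hm
    simpa [pvMn, hm] using this

theorem pvFMax_concat (ra : List Int) (h : ra ≠ []) (v : Int) :
    pvFMax (ra ++ [v]) = if pvMx ra < v then (ra.length : Int) else pvFMax ra := by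
  unfold pvFMax
  rw [show (ra ++ [v]).length = ra.length + 1 by simp, List.range_succ, List.find?_append]
  by_cases hv : pvMx ra < v
  · have hmx : pvMx (ra ++ [v]) = v := by
      rw [pvMx_concat ra h v]; omega
    have h1 : (List.range ra.length).find? (pvPMax (ra ++ [v])) = none := by
      rw [List.find?_eq_none]
      intro y hy
      rw [List.mem_range] at hy
      have hle := pvMx_le ra h ra[y] (List.getElem_mem hy)
      simp [pvPMax, PySem.List.pyGet?_natCast, List.getElem?_append_left hy,
            List.getElem?_eq_getElem hy, hmx]
      omega
    have h2 : List.find? (pvPMax (ra ++ [v])) [ra.length] = some ra.length := by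
      simp [List.find?, pvPMax, hmx]
    rw [h1, h2]
    simp [hv]
  · have hmx : pvMx (ra ++ [v]) = pvMx ra := by
      rw [pvMx_concat ra h v]; omega
    have hcongr : (List.range ra.length).find? (pvPMax (ra ++ [v]))
        = (List.range ra.length).find? (pvPMax ra) := by
      apply find?_congr_mem
      intro y hy
      rw [List.mem_range] at hy
      simp [pvPMax, PySem.List.pyGet?_natCast, List.getElem?_append_left hy, hmx]
    obtain ⟨j, hj, hjv⟩ := List.mem_iff_getElem.mp (pvMx_mem ra h)
    have hsome : ((List.range ra.length).find? (pvPMax ra)).isSome = true := by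
      rw [List.find?_isSome]
      exact ⟨j, List.mem_range.mpr hj,
        by simp [pvPMax, PySem.List.pyGet?_natCast, List.getElem?_eq_getElem hj, hjv]⟩
    obtain ⟨y0, hy0⟩ := Option.isSome_iff_exists.mp hsome
    rw [hcongr, hy0]
    simp [hv]

theorem pvFMin_concat (ra : List Int) (h : ra ≠ []) (v : Int) :
    pvFMin (ra ++ [v]) = if v < pvMn ra then (ra.length : Int) else pvFMin ra := by
  unfold pvFMin
  rw [show (ra ++ [v]).length = ra.length + 1 by simp, List.range_succ, List.find?_append]
  by_cases hv : v < pvMn ra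
  · have hmn : pvMn (ra ++ [v]) = v := by
      rw [pvMn_concat ra h v]; omega
    have h1 : (List.range ra.length).find? (pvPMin (ra ++ [v])) = none := by
      rw [List.find?_eq_none]
      intro y hy
      rw [List.mem_range] at hy
      have hle := pvMn_le ra h ra[y] (List.getElem_mem hy)
      simp [pvPMin, PySem.List.pyGet?_natCast, List.getElem?_append_left hy,
            List.getElem?_eq_getElem hy, hmn]
      omega
    have h2 : List.find? (pvPMin (ra ++ [v])) [ra.length] = some ra.length := by
      simp [List.find?, pvPMin, hmn]
    rw [h1, h2]
    simp [hv]
  · have hmn : pvMn (ra ++ [v]) = pvMn ra := by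
      rw [pvMn_concat ra h v]; omega
    have hcongr : (List.range ra.length).find? (pvPMin (ra ++ [v]))
        = (List.range ra.length).find? (pvPMin ra) := by
      apply find?_congr_mem
      intro y hy
      rw [List.mem_range] at hy
      simp [pvPMin, PySem.List.pyGet?_natCast, List.getElem?_append_left hy, hmn]
    obtain ⟨j, hj, hjv⟩ := List.mem_iff_getElem.mp (pvMn_mem ra h)
    have hsome : ((List.range ra.length).find? (pvPMin ra)).isSome = true := by
      rw [List.find?_isSome]
      exact ⟨j, List.mem_range.mpr hj,
        by simp [pvPMin, PySem.List.pyGet?_natCast, List.getElem?_eq_getElem hj, hjv]⟩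
    obtain ⟨y0, hy0⟩ := Option.isSome_iff_exists.mp hsome
    rw [hcongr, hy0]
    simp [hv]

-- the master invariant: B's scan state after cs
theorem pvMaster (cs : List Char) :
    cs.foldl
      (fun (st : Int × Int × Int × Int × Int × Int) ch =>
        match st with
        | (y, maxv, maxi, minv, mini, i) =>
          let y' := if ch == 'C' then y + 1 else if ch == 'G' then y - 1 else y
          let m := if y' > maxv then (y', i) else (maxv, maxi)
          let n := if y' < minv then (y', i) else (minv, mini)
          (y', m.1, m.2, n.1, n.2, i + 1))
      (0, 0, 0, 0, 0, 1)
    = ((pvYm cs).getLastD 0, pvMx (pvYm cs), pvFMax (pvYm cs),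
       pvMn (pvYm cs), pvFMin (pvYm cs), ((pvYm cs).length : Int)) := by
  induction cs using List.reverseRecOn with
  | nil => decide
  | append_singleton cs d ih =>
    have hne := pvYm_ne_nil cs
    rw [List.foldl_append, ih, List.foldl_cons, List.foldl_nil]
    dsimp only
    rw [pvIfDy]
    rw [pvYm_snoc cs d]
    rw [pvMx_concat _ hne, pvMn_concat _ hne, pvFMax_concat _ hne, pvFMin_concat _ hne,
        List.getLastD_concat]
    simp only [gt_iff_lt, Prod.mk.injEq]
    split_ifs with h1 h2 h3 <;> (simp only [Prod.mk.injEq]) <;>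
      exact ⟨trivial, by omega, trivial, by omega, trivial, by simp⟩

theorem foldl_append_map {α β : Type} (f : α → β) :
    ∀ (l : List α) (acc : List β),
      l.foldl (fun acc x => acc ++ [f x]) acc = acc ++ l.map f := by
  intro l
  induction l with
  | nil => intro acc; simp
  | cons x xs ih => intro acc; simp [ih]

theorem result_a_eq (cs : List Char) :
    (List.range (pvVector cs).length).foldl
      (fun acc (x : Nat) => acc ++ [((PySem.List.pyGet? (pvVector cs) (x : Int)).getD (0, 0)).2])
      ([] : List Int) = pvYm cs := by
  rw [foldl_append_map (fun x : Nat => ((PySem.List.pyGet? (pvVector cs) (x : Int)).getD (0, 0)).2)]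
  unfold pvYm
  apply List.ext_getElem
  · simp
  · intro i h1 h2
    have hlt : i < (pvVector cs).length := by simpa using h2
    simp [PySem.List.pyGet?_natCast, List.getElem?_eq_getElem hlt]

theorem pvFindFirstMax_eq_find (ra : List Int) :
    ∀ idxs, pvFindFirstMax ra idxs = (((idxs.find? (pvPMax ra)).getD 0 : Nat) : Int) := by
  intro idxs
  induction idxs with
  | nil => rfl
  | cons y rest ih =>
    simp only [pvFindFirstMax]
    cases h : ((PySem.List.pyGet? ra (y : Int)).getD 0 == (PySem.List.max? ra (fun v => v)).getD 0) with
    | true =>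
      simp only [PySem.List.pyGet?_natCast] at h
      simp [List.find?, pvPMax, pvMx, h]
    | false =>
      simp only [PySem.List.pyGet?_natCast] at h
      simp [List.find?, pvPMax, pvMx, h, ih]

theorem pvFindFirstMax_eq (ra : List Int) :
    pvFindFirstMax ra (List.range ra.length) = pvFMax ra := by
  rw [pvFindFirstMax_eq_find]; rfl

theorem pvFindFirstMin_eq_find (ra : List Int) :
    ∀ idxs, pvFindFirstMin ra idxs = (((idxs.find? (pvPMin ra)).getD 0 : Nat) : Int) := by
  intro idxs
  induction idxs with
  | nil => rfl
  | cons w rest ih =>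
    simp only [pvFindFirstMin]
    cases h : ((PySem.List.pyGet? ra (w : Int)).getD 0 == (PySem.List.min? ra (fun v => v)).getD 0) with
    | true =>
      simp only [PySem.List.pyGet?_natCast] at h
      simp [List.find?, pvPMin, pvMn, h]
    | false =>
      simp only [PySem.List.pyGet?_natCast] at h
      simp [List.find?, pvPMin, pvMn, h, ih]

theorem pvFindFirstMin_eq (ra : List Int) :
    pvFindFirstMin ra (List.range ra.length) = pvFMin ra := by
  rw [pvFindFirstMin_eq_find]; rfl

-- ===== VERDICT (by name: the statement is the Claim_ definition above) =====
theorem replicatie_spec : Claim_equal_replicatie := by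
  intro B _
  unfold Spec_replicatie replicatie replicatie_alt
  simp only [result_a_eq, pvFindFirstMax_eq, pvFindFirstMin_eq, pvMaster]
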